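-- pv_equiv track=rewrite | github.com/Altez50/csvQuery | v1/sql_query_constructor.py | split_sql_list
-- ===== SOURCE A (Python) =====
-- def split_sql_list(text):
--     """Split SQL list by comma, respecting parentheses"""
--     parts = []
--     current_part = ''
--     paren_count = 0
--
--     for char in text:
--         if char == '(':
--             paren_count += 1
--         elif char == ')':
--             paren_count -= 1
--         elif char == ',' and paren_count == 0:
--             parts.append(current_part.strip())
--             current_part = ''
--             continue
--
--         current_part += char
--
--     if current_part.strip():
--         parts.append(current_part.strip())
--
--     return parts
-- ===== SOURCE B (Python) =====
-- def split_sql_list(text):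
--     """Split SQL list by comma, respecting parentheses: find top-level
--     comma positions in one scan, then slice the text at those boundaries."""
--     depth = 0
--     cuts = []
--     for i, ch in enumerate(text):
--         if ch == '(':
--             depth += 1
--         elif ch == ')':
--             depth -= 1
--         elif ch == ',' and depth == 0:
--             cuts.append(i)
--     parts = []
--     start = 0
--     for i in cuts:
--         parts.append(text[start:i].strip())
--         start = i + 1
--     last = text[start:].strip()
--     if last:
--         parts.append(last)
--     return parts
-- ===== Notes on version B (the rewrite author's own statement) =====
-- stated objective: alternative
-- what changed: B finds the indices of all top-level commas in one scan and then slices the original string at those boundaries, instead of building each part character by character in the scanning loop.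
import Mathlib
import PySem

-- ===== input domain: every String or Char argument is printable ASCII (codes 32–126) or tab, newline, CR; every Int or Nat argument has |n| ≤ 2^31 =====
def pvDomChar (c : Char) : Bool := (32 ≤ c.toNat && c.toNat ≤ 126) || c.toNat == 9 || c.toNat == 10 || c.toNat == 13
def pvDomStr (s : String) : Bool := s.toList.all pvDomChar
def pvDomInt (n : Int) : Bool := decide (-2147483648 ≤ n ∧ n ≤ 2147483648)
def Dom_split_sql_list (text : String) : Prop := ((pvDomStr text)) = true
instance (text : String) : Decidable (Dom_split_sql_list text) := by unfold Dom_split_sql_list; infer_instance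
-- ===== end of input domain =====

-- B separates boundary-finding (indices of top-level commas) from substring construction
-- by slicing, instead of A's building each part character by character; alternative, same cost.

-- ===== PORT A =====
-- the loop body of A: state = (parts, current_part, paren_count)
def pvStepA (st : List (List Char) × List Char × Int) (c : Char) :
    List (List Char) × List Char × Int :=
  if c = '(' then (st.1, st.2.1 ++ [c], st.2.2 + 1)
  else if c = ')' then (st.1, st.2.1 ++ [c], st.2.2 - 1)
  else if c = ',' ∧ st.2.2 = 0 then (st.1 ++ [PySem.Chars.strip st.2.1], [], st.2.2)
  else (st.1, st.2.1 ++ [c], st.2.2)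

def split_sql_list (text : String) : List String :=
  let fin := text.toList.foldl pvStepA ([], [], 0)
  let parts := if PySem.Chars.strip fin.2.1 ≠ [] then fin.1 ++ [PySem.Chars.strip fin.2.1] else fin.1
  parts.map String.ofList

-- ===== PORT B =====
-- first pass: collect indices of top-level commas; state = (cuts, depth)
def pvStepP1 (st : List Int × Int) (ic : Int × Char) : List Int × Int :=
  if ic.2 = '(' then (st.1, st.2 + 1)
  else if ic.2 = ')' then (st.1, st.2 - 1)
  else if ic.2 = ',' ∧ st.2 = 0 then (st.1 ++ [ic.1], st.2)
  else (st.1, st.2)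

-- second pass: slice at the recorded boundaries; state = (parts, start)
def pvStepP2 (cs : List Char) (st : List (List Char) × Int) (i : Int) :
    List (List Char) × Int :=
  (st.1 ++ [PySem.Chars.strip (PySem.List.slice cs (some st.2) (some i))], i + 1)

def split_sql_list_alt (text : String) : List String :=
  let cs := text.toList
  let p1 := (PySem.List.enumerate cs).foldl pvStepP1 ([], 0)
  let p2 := p1.1.foldl (pvStepP2 cs) ([], 0)
  let last := PySem.Chars.strip (PySem.List.slice cs (some p2.2) none)
  let parts := if last ≠ [] then p2.1 ++ [last] else p2.1
  parts.map String.ofList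

-- ===== PRECONDITION & SPEC =====
def Spec_split_sql_list (text : String) (out : List String) : Prop := out = split_sql_list_alt text
instance (text : String) (out : List String) : Decidable (Spec_split_sql_list text out) := by unfold Spec_split_sql_list; infer_instance

-- ===== CLAIM (what is proved, stated in full; the proofs are below) =====
def Claim_equal_split_sql_list : Prop := ∀ (text : String), Dom_split_sql_list text → Spec_split_sql_list text (split_sql_list text)

-- ===== LEMMAS AND PROOFS =====

-- canonical recursive description of the result (as lists of chars)
def pvOut : List Char → List Char → Int → List (List Char)
  | [], cur, _ => if PySem.Chars.strip cur ≠ [] then [PySem.Chars.strip cur] else []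
  | c :: cs, cur, d =>
    if c = '(' then pvOut cs (cur ++ [c]) (d + 1)
    else if c = ')' then pvOut cs (cur ++ [c]) (d - 1)
    else if c = ',' ∧ d = 0 then PySem.Chars.strip cur :: pvOut cs [] d
    else pvOut cs (cur ++ [c]) d

-- A's finish step, named so the fold lemma has no 'let'
def pvFinA (st : List (List Char) × List Char × Int) : List (List Char) :=
  if PySem.Chars.strip st.2.1 ≠ [] then st.1 ++ [PySem.Chars.strip st.2.1] else st.1

lemma pvA_spec : ∀ (cs : List Char) (parts : List (List Char)) (cur : List Char) (d : Int),
    pvFinA (cs.foldl pvStepA (parts, cur, d)) = parts ++ pvOut cs cur d := by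
  intro cs
  induction cs with
  | nil =>
    intro parts cur d
    simp only [List.foldl_nil, pvFinA, pvOut]
    split_ifs <;> simp
  | cons c cs ih =>
    intro parts cur d
    simp only [List.foldl_cons, pvStepA, pvOut]
    split_ifs with h1 h2 h3
    · exact ih parts (cur ++ [c]) (d + 1)
    · exact ih parts (cur ++ [c]) (d - 1)
    · rw [ih (parts ++ [PySem.Chars.strip cur]) [] d]; simp
    · exact ih parts (cur ++ [c]) d

lemma pvP1_acc : ∀ (l : List (Int × Char)) (acc : List Int) (d : Int),
    l.foldl pvStepP1 (acc, d)
      = (acc ++ (l.foldl pvStepP1 ([], d)).1, (l.foldl pvStepP1 ([], d)).2) := by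
  intro l
  induction l with
  | nil => intro acc d; simp
  | cons ic l ih =>
    intro acc d
    simp only [List.foldl_cons, pvStepP1]
    split_ifs with h1 h2 h3
    · exact ih acc (d + 1)
    · exact ih acc (d - 1)
    · rw [ih (acc ++ [ic.1]) d, ih ([] ++ [ic.1]) d]; simp
    · exact ih acc d

lemma pvTake_snoc (full : List Char) (s start : Nat) (c : Char) (cs : List Char)
    (hss : start ≤ s) (hdrop : full.drop s = c :: cs) :
    (full.drop start).take (s + 1 - start) = (full.drop start).take (s - start) ++ [c] := by
  have hget : full[s]? = some c := by
    have h0 : (full.drop s)[0]? = some c := by rw [hdrop]; rfl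
    rw [List.getElem?_drop] at h0
    simpa using h0
  have h1 : s + 1 - start = (s - start) + 1 := by omega
  rw [h1, List.take_add_one]
  have h2 : (full.drop start)[s - start]? = some c := by
    rw [List.getElem?_drop]
    have h3 : start + (s - start) = s := by omega
    rw [h3, hget]
  simp [h2]

-- B's finish: run the second pass over the cuts and handle the last segment
def pvFinB (cs : List Char) (cuts : List Int) (parts : List (List Char)) (start : Int) :
    List (List Char) :=
  let p2 := cuts.foldl (pvStepP2 cs) (parts, start)
  let last := PySem.Chars.strip (PySem.List.slice cs (some p2.2) none)
  if last ≠ [] then p2.1 ++ [last] else p2.1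

lemma pvB_main (full : List Char) : ∀ (cs : List Char) (s start : Nat) (d : Int)
    (parts : List (List Char)), start ≤ s → full.drop s = cs →
    pvFinB full ((PySem.List.enumerate cs (s : Int)).foldl pvStepP1 ([], d)).1 parts (start : Int)
      = parts ++ pvOut cs ((full.drop start).take (s - start)) d := by
  intro cs
  induction cs with
  | nil =>
    intro s start d parts hss hdrop
    have hlen : full.length - s = 0 := by simpa using congrArg List.length hdrop
    have htake : (full.drop start).take (s - start) = full.drop start := by
      apply List.take_of_length_le
      simp
      omega
    simp only [PySem.List.enumerate_nil, List.foldl_nil, pvFinB, List.foldl_nil, pvOut, htake]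
    rw [PySem.List.slice_from_natCast]
    split_ifs <;> simp
  | cons c cs ih =>
    intro s start d parts hss hdrop
    have hdrop' : full.drop (s + 1) = cs := by
      have h4 : full.drop (s + 1) = (full.drop s).drop 1 := by
        rw [List.drop_drop]
      rw [h4, hdrop]
      simp
    have hcast : ((s : Int) + 1) = ((s + 1 : Nat) : Int) := by push_cast; ring
    rw [PySem.List.enumerate_cons]
    simp only [List.foldl_cons]
    by_cases h1 : c = '('
    · have hstep : pvStepP1 ([], d) ((s : Int), c) = ([], d + 1) := by simp [pvStepP1, h1]
      rw [hstep, hcast, ih (s + 1) start (d + 1) parts (by omega) hdrop',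
        pvTake_snoc full s start c cs hss hdrop]
      simp [pvOut, h1]
    · by_cases h2 : c = ')'
      · have hstep : pvStepP1 ([], d) ((s : Int), c) = ([], d - 1) := by
          simp [pvStepP1, h2]
        rw [hstep, hcast, ih (s + 1) start (d - 1) parts (by omega) hdrop',
          pvTake_snoc full s start c cs hss hdrop]
        simp [pvOut, h2]
      · by_cases h3 : c = ',' ∧ d = 0
        · have hstep : pvStepP1 ([], d) ((s : Int), c) = ([(s : Int)], d) := by
            simp [pvStepP1, h3]
          rw [hstep, pvP1_acc]
          simp only [pvFinB, List.foldl_append, List.foldl_cons, List.foldl_nil, pvStepP2]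
          rw [PySem.List.slice_natCast]
          have hIH := ih (s + 1) (s + 1) d
            (parts ++ [PySem.Chars.strip ((full.drop start).take (s - start))]) (le_refl _) hdrop'
          simp only [pvFinB] at hIH
          rw [hcast, hIH]
          simp [pvOut, h3.1, h3.2]
        · have hstep : pvStepP1 ([], d) ((s : Int), c) = ([], d) := by
            simp [pvStepP1, h1, h2, h3]
          rw [hstep, hcast, ih (s + 1) start d parts (by omega) hdrop',
            pvTake_snoc full s start c cs hss hdrop]
          simp [pvOut, h1, h2, h3]

-- ===== VERDICT (by name: the statement is the Claim_ definition above) =====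
theorem split_sql_list_spec : Claim_equal_split_sql_list := by
  intro text _
  unfold Spec_split_sql_list
  show split_sql_list text = split_sql_list_alt text
  have hA := pvA_spec text.toList [] [] 0
  simp only [pvFinA] at hA
  have hB := pvB_main text.toList text.toList 0 0 0 [] (le_refl 0) (by simp)
  simp only [pvFinB, Nat.cast_zero] at hB
  simp only [List.drop_zero, List.take_zero, Nat.sub_zero, List.nil_append] at hA hB
  simp only [split_sql_list, split_sql_list_alt]
  rw [hA, hB]
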